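-- pv_equiv track=rewrite | github.com/probablyquill/UltrixGVGControl | temp.py | number_to_hex
-- ===== SOURCE A (Python) =====
-- def number_to_hex(input: int) -> str:
--     # Converts the input from an integer to a hex string
--     # Int 15 = "0x0f"
--     output = hex(input)
--
--     # Trim the hex string and switch it to upercase.
--     # "0x0f" -> "0F"
--     output = output.split('x')[-1].upper()
--
--     # Extend the string until it has a length of four.
--     # "0F" -> "000F"
--     while (len(output) < 4):
--         output = "0" + output
--
--     # Change the output variable to be encoded in ascii.
--     output = output.encode('ascii')
--     # Change the output from ASCII to Hex
--     # "000F" -> "30303046"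
--     output = output.hex()
--     i = 0
--     return_string = ""
--
--     #Format the string
--     # "30303046" -> "30 30 30 46 "
--     while i < len(output):
--         return_string += output[i]
--         if(i % 2 != 0): return_string += " "
--         i += 1
--
--     return return_string
-- ===== SOURCE B (Python) =====
-- def number_to_hex(input: int) -> str:
--     # Pure-arithmetic version: no hex()/format()/ord()/encode stages at all.
--     # Extract base-16 digits of |input| by recursive divmod (A's hex() drops the
--     # sign the same way via split('x')[-1]); pad the digit list to 4 numerically.
--     # A digit d (0..15) prints as the ASCII code of its uppercase hex character,
--     # in lowercase hex: 48+d = "3<d>" for d<10, 55+d = "4<d-9>" for d>=10,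
--     # each followed by a space; both pieces are computed arithmetically.
--     def digits(n):
--         return (digits(n // 16) if n >= 16 else []) + [n % 16]
--     ds = digits(abs(input))
--     ds = [0] * (4 - len(ds)) + ds
--     return ''.join(('3%d ' % d) if d < 10 else ('4%d ' % (d - 9)) for d in ds)
-- ===== Notes on version B (the rewrite author's own statement) =====
-- stated objective: alternative
-- what changed: Replaces A's string pipeline (hex(), split, upper, pad loop, encode('ascii'), bytes.hex(), parity index loop) by pure integer arithmetic: recursive divmod-16 digit extraction, numeric zero-padding of the digit list, and an arithmetic per-digit formula ('3<d> ' for d<10, '4<d-9> ' for d>=10) producing the ASCII-code-in-hex output directly, with no character/ordinal conversions.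
import Mathlib
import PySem

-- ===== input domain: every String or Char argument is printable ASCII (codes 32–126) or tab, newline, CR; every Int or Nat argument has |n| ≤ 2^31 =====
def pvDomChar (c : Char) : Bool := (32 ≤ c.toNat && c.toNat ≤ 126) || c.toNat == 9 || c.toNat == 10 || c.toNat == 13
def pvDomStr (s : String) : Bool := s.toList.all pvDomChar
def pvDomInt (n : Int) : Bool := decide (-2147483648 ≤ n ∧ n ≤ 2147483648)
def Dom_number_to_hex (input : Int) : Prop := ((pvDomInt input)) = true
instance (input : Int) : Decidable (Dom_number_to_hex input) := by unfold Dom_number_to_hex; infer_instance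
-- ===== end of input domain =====

-- B replaces A's string pipeline (hex -> split/upper -> pad loop -> encode('ascii') -> .hex() ->
-- parity index loop) by pure integer arithmetic on a divmod-16 digit list (objective: alternative).

-- ===== PORT A =====
-- hex() and bytes.hex() have no PySem primitive; they are ported by hand, step for step.
-- hexDigitL is Python's lowercase hex-digit table.
def hexDigitL (m : Nat) : Char := ("0123456789abcdef".toList).getD m '0'

-- digit loop of hex(): lowercase hex digits of n, most significant first (exact, hex(0) = "0x0")
def natToHexL (n : Nat) : List Char :=
  if n < 16 then [hexDigitL n]
  else natToHexL (n / 16) ++ [hexDigitL (n % 16)]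
decreasing_by exact Nat.div_lt_self (by omega) (by omega)

-- .encode('ascii').hex(): two lowercase hex digits per byte (exact: every char reaching it here is ASCII)
def asciiHex (cs : List Char) : List Char :=
  cs.flatMap (fun c => [hexDigitL (c.toNat / 16), hexDigitL (c.toNat % 16)])

-- the while-loop prepending "0" until the length is four
def padLoop (cs : List Char) : List Char :=
  if cs.length < 4 then padLoop ('0' :: cs) else cs
termination_by 4 - cs.length
decreasing_by simp; omega

-- the final while-loop over the index i, appending a space after each odd index
def spaceLoop (out : List Char) (i : Nat) (ret : List Char) : List Char :=
  if h : i < out.length then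
    spaceLoop out (i + 1) ((ret ++ [out[i]]) ++ (if i % 2 ≠ 0 then [' '] else []))
  else ret
termination_by out.length - i
decreasing_by omega

def number_to_hex (input : Int) : String :=
  -- output = hex(input)
  let output0 : List Char :=
    (if input < 0 then ['-', '0', 'x'] else ['0', 'x']) ++ natToHexL input.natAbs
  -- output = output.split('x')[-1].upper()   (split never returns [], so [-1] is the last element)
  let output1 : List Char :=
    PySem.Chars.upper (((PySem.Chars.split? output0 ['x']).getD []).getLastD [])
  -- while (len(output) < 4): output = "0" + output
  let output2 : List Char := padLoop output1
  -- output = output.encode('ascii'); output = output.hex()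
  let output3 : List Char := asciiHex output2
  -- the formatting loop
  String.mk (spaceLoop output3 0 [])

-- ===== PORT B =====
-- pyDigits ports B's recursive helper digits(n): base-16 digits of n, most significant first.
def pyDigits (n : Nat) : List Nat :=
  (if h : 16 ≤ n then pyDigits (n / 16) else []) ++ [n % 16]
decreasing_by exact Nat.div_lt_self (by omega) (by omega)

-- '3%d ' % d and '4%d ' % (d-9): '%d' of a one-digit number is the character code 48+<it> (exact here)
def digitTriple (d : Nat) : List Char :=
  if d < 10 then ['3', Char.ofNat (48 + d), ' '] else ['4', Char.ofNat (48 + (d - 9)), ' ']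

def number_to_hex_alt (input : Int) : String :=
  let ds := pyDigits input.natAbs
  let ds2 := List.replicate (4 - ds.length) 0 ++ ds
  String.mk ((ds2.map digitTriple).flatten)

-- ===== PRECONDITION & SPEC =====
def Spec_number_to_hex (input : Int) (out : String) : Prop := out = number_to_hex_alt input
instance (input : Int) (out : String) : Decidable (Spec_number_to_hex input out) := by unfold Spec_number_to_hex; infer_instance

-- ===== CLAIM =====
def Claim_equal_number_to_hex : Prop := ∀ (input : Int), Dom_number_to_hex input → Spec_number_to_hex input (number_to_hex input)

-- ===== LEMMAS AND PROOFS =====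

def hexDigitU (m : Nat) : Char := ("0123456789ABCDEF".toList).getD m '0'

theorem hexDigitL_mem (m : Nat) : hexDigitL m ∈ "0123456789abcdef".toList := by
  unfold hexDigitL
  rw [List.getD_eq_getElem?_getD]
  rcases h : ("0123456789abcdef".toList)[m]? with _ | c
  · decide
  · simpa using List.mem_of_getElem? h

theorem natToHexL_subset : ∀ (n : Nat) {c : Char},
    c ∈ natToHexL n → c ∈ "0123456789abcdef".toList := by
  intro n
  induction n using Nat.strong_induction_on with
  | _ n ih =>
    intro c h
    rw [natToHexL] at h
    split at h
    · simp at h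
      exact h ▸ hexDigitL_mem _
    · next hge =>
      rcases List.mem_append.1 h with h' | h'
      · exact ih (n / 16) (Nat.div_lt_self (by omega) (by omega)) h'
      · simp at h'
        exact h' ▸ hexDigitL_mem _

theorem x_not_mem_natToHexL (n : Nat) : 'x' ∉ natToHexL n := by
  intro h
  have := natToHexL_subset n h
  revert this; decide

-- A's digit string is B's digit list rendered through the lowercase table
theorem natToHexL_eq_map : ∀ (n : Nat), natToHexL n = (pyDigits n).map hexDigitL := by
  intro n
  induction n using Nat.strong_induction_on with
  | _ n ih =>
    rw [natToHexL, pyDigits]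
    by_cases h : 16 ≤ n
    · rw [if_neg (by omega), dif_pos h, List.map_append,
        ih (n / 16) (Nat.div_lt_self (by omega) (by omega))]
      simp
    · rw [if_pos (by omega), dif_neg h]
      simp [Nat.mod_eq_of_lt (by omega : n < 16)]

theorem pyDigits_lt : ∀ (n : Nat) {d : Nat}, d ∈ pyDigits n → d < 16 := by
  intro n
  induction n using Nat.strong_induction_on with
  | _ n ih =>
    intro d h
    rw [pyDigits] at h
    rcases List.mem_append.1 h with h' | h'
    · split at h'
      · exact ih (n / 16) (Nat.div_lt_self (by omega) (by omega)) h'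
      · simp at h'
    · simp at h'
      omega

theorem upperChar_hexDigit (m : Nat) :
    PySem.Chars.upperChar (hexDigitL m) = hexDigitU m := by
  by_cases h : m < 16
  · interval_cases m <;> decide
  · have h1 : ("0123456789abcdef".toList).length = 16 := by decide
    have h2 : ("0123456789ABCDEF".toList).length = 16 := by decide
    unfold hexDigitL hexDigitU
    rw [List.getD_eq_default _ _ (by omega), List.getD_eq_default _ _ (by omega)]
    decide

-- splitOn.go consumes a separator-free list entirely into cur
theorem go_no_x (d : List Char) : ∀ (fuel : Nat) (cur : List Char) (acc : List (List Char)),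
    'x' ∉ d → d.length ≤ fuel →
    PySem.Chars.splitOn.go ['x'] fuel d cur acc = ((cur.reverse ++ d) :: acc).reverse := by
  induction d with
  | nil =>
    intro fuel cur acc _ _
    cases fuel <;> (rw [PySem.Chars.splitOn.go.eq_def]; try simp)
  | cons c rest ih =>
    intro fuel cur acc hx hlen
    cases fuel with
    | zero => simp at hlen
    | succ f =>
      have hc : ('x' == c) = false := by
        simp only [beq_eq_false_iff_ne, ne_eq]
        intro e; exact hx (List.mem_cons.mpr (Or.inl e))
      rw [PySem.Chars.splitOn.go.eq_def]
      simp only [List.isPrefixOf, hc, Bool.false_and, Bool.false_eq_true, if_false]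
      rw [ih f (c :: cur) acc (fun h => hx (List.mem_cons_of_mem _ h)) (by simp at hlen; omega)]
      simp

-- splitOn.go on <no-x prefix> ++ 'x' :: <no-x rest> yields exactly those two pieces
theorem go_split (d : List Char) (hxd : 'x' ∉ d) :
    ∀ (p : List Char) (fuel : Nat) (cur : List Char) (acc : List (List Char)),
    'x' ∉ p → p.length + d.length + 1 ≤ fuel →
    PySem.Chars.splitOn.go ['x'] fuel (p ++ 'x' :: d) cur acc
      = (d :: (cur.reverse ++ p) :: acc).reverse := by
  intro p
  induction p with
  | nil =>
    intro fuel cur acc _ hlen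
    cases fuel with
    | zero => omega
    | succ f =>
      rw [PySem.Chars.splitOn.go.eq_def]
      have hpre : (['x'] : List Char).isPrefixOf ('x' :: d) = true := by
        simp [List.isPrefixOf]
      simp only [List.nil_append, hpre, if_true]
      rw [show List.drop (['x'] : List Char).length ('x' :: d) = d from rfl]
      rw [go_no_x d f [] (cur.reverse :: acc) hxd (by simp at hlen; omega)]
      simp
  | cons c p' ih =>
    intro fuel cur acc hxp hlen
    cases fuel with
    | zero => simp at hlen
    | succ f =>
      have hc : ('x' == c) = false := by
        simp only [beq_eq_false_iff_ne, ne_eq]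
        intro e; exact hxp (List.mem_cons.mpr (Or.inl e))
      rw [PySem.Chars.splitOn.go.eq_def]
      simp only [List.cons_append, List.isPrefixOf, hc, Bool.false_and, Bool.false_eq_true, if_false]
      rw [ih f (c :: cur) acc (fun h => hxp (List.mem_cons_of_mem _ h)) (by simp at hlen ⊢; omega)]
      simp

theorem splitOn_sandwich (p d : List Char) (hxp : 'x' ∉ p) (hxd : 'x' ∉ d) :
    PySem.Chars.splitOn (p ++ 'x' :: d) ['x'] = [p, d] := by
  unfold PySem.Chars.splitOn
  rw [go_split d hxd p _ [] [] hxp (by simp)]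
  simp

theorem padLoop_eq : ∀ (j : Nat) (cs : List Char), 4 - cs.length ≤ j →
    padLoop cs = List.replicate (4 - cs.length) '0' ++ cs := by
  intro j
  induction j with
  | zero =>
    intro cs h
    rw [padLoop, if_neg (by omega : ¬ cs.length < 4)]
    have e : 4 - cs.length = 0 := by omega
    rw [e]; simp
  | succ j ih =>
    intro cs h
    rw [padLoop]
    by_cases h4 : cs.length < 4
    · rw [if_pos h4, ih ('0' :: cs) (by simp; omega)]
      have e : 4 - cs.length = (4 - ('0' :: cs).length) + 1 := by simp; omega
      rw [e, List.replicate_succ']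
      simp
    · rw [if_neg h4]
      have e : 4 - cs.length = 0 := by omega
      rw [e]; simp

-- the one-pass shape both programs produce: chars with a space after every odd position
def fmtChars : List Char → Bool → List Char
  | [], _ => []
  | c :: r, true => c :: fmtChars r false
  | c :: r, false => c :: ' ' :: fmtChars r true

theorem spaceLoop_eq : ∀ (j : Nat) (out : List Char) (i : Nat) (ret : List Char),
    out.length - i ≤ j →
    spaceLoop out i ret = ret ++ fmtChars (out.drop i) (decide (i % 2 = 0)) := by
  intro j
  induction j with
  | zero =>
    intro out i ret h
    rw [spaceLoop, dif_neg (by omega : ¬ i < out.length)]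
    rw [List.drop_eq_nil_of_le (by omega : out.length ≤ i)]
    simp [fmtChars]
  | succ j ih =>
    intro out i ret h
    rw [spaceLoop]
    by_cases hi : i < out.length
    · rw [dif_pos hi, ih out (i + 1) _ (by omega)]
      rw [List.drop_eq_getElem_cons hi]
      by_cases hp : i % 2 = 0
      · have h1 : (i + 1) % 2 ≠ 0 := by omega
        rw [if_neg (by omega : ¬ i % 2 ≠ 0),
          show (decide (i % 2 = 0)) = true by simp [hp],
          show (decide ((i + 1) % 2 = 0)) = false by simp [h1],
          show fmtChars (out[i] :: List.drop (i + 1) out) true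
            = out[i] :: fmtChars (List.drop (i + 1) out) false from rfl]
        simp
      · have h1 : (i + 1) % 2 = 0 := by omega
        rw [if_pos hp,
          show (decide (i % 2 = 0)) = false by simp [hp],
          show (decide ((i + 1) % 2 = 0)) = true by simp [h1],
          show fmtChars (out[i] :: List.drop (i + 1) out) false
            = out[i] :: ' ' :: fmtChars (List.drop (i + 1) out) true from rfl]
        simp
    · rw [dif_neg hi]
      rw [List.drop_eq_nil_of_le (by omega : out.length ≤ i)]
      simp [fmtChars]

theorem fmt_flat {α : Type} (f g : α → Char) : ∀ (s : List α),
    fmtChars (s.flatMap (fun d => [f d, g d])) true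
      = (s.map (fun d => [f d, g d, ' '])).flatten := by
  intro s
  induction s with
  | nil => rfl
  | cons c r ih => simp [List.flatMap_cons, fmtChars, ih]

-- the per-digit arithmetic of B reproduces A's ascii-code-of-uppercase-char-in-hex pair
theorem pair_eq_triple (d : Nat) (hd : d < 16) :
    [hexDigitL ((hexDigitU d).toNat / 16), hexDigitL ((hexDigitU d).toNat % 16), ' ']
      = digitTriple d := by
  interval_cases d <;> decide

-- ===== VERDICT =====
theorem number_to_hex_spec : Claim_equal_number_to_hex := by
  intro input _
  unfold Spec_number_to_hex number_to_hex number_to_hex_alt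
  dsimp only
  have h0 : (if input < 0 then ['-', '0', 'x'] else ['0', 'x']) ++ natToHexL input.natAbs
      = (if input < 0 then ['-', '0'] else ['0']) ++ 'x' :: natToHexL input.natAbs := by
    split <;> simp
  have hxp : 'x' ∉ (if input < 0 then ['-', '0'] else ['0']) := by split <;> decide
  have h1 : PySem.Chars.split?
      ((if input < 0 then ['-', '0', 'x'] else ['0', 'x']) ++ natToHexL input.natAbs) ['x']
      = some [(if input < 0 then ['-', '0'] else ['0']), natToHexL input.natAbs] := by
    rw [h0]
    simp [PySem.Chars.split?, splitOn_sandwich _ _ hxp (x_not_mem_natToHexL _)]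
  rw [h1]
  simp only [Option.getD_some]
  rw [show ([(if input < 0 then ['-', '0'] else ['0']), natToHexL input.natAbs]).getLastD
      ([] : List Char) = natToHexL input.natAbs from rfl]
  -- A's uppercased digit string is B's digit list through the uppercase table
  have hmap : PySem.Chars.upper (natToHexL input.natAbs)
      = (pyDigits input.natAbs).map hexDigitU := by
    rw [natToHexL_eq_map]
    simp [PySem.Chars.upper, upperChar_hexDigit]
  rw [hmap]
  set ds := pyDigits input.natAbs with hds
  -- A's pad loop = numeric pad rendered through the table (hexDigitU 0 = '0')
  have hpad : padLoop (ds.map hexDigitU)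
      = (List.replicate (4 - ds.length) 0 ++ ds).map hexDigitU := by
    rw [padLoop_eq (4 - (ds.map hexDigitU).length) _ le_rfl, List.map_append,
      List.map_replicate, List.length_map]
    rfl
  rw [hpad]
  set ds2 := List.replicate (4 - ds.length) 0 ++ ds with hds2
  have hlt : ∀ d ∈ ds2, d < 16 := by
    intro d hd
    rcases List.mem_append.1 hd with h | h
    · have := List.eq_of_mem_replicate h
      omega
    · exact pyDigits_lt _ h
  have hflat : asciiHex (ds2.map hexDigitU)
      = ds2.flatMap (fun d => [hexDigitL ((hexDigitU d).toNat / 16),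
                               hexDigitL ((hexDigitU d).toNat % 16)]) := by
    simp [asciiHex, List.flatMap_map]
  rw [spaceLoop_eq (asciiHex (ds2.map hexDigitU)).length _ 0 [] (by omega)]
  rw [List.drop_zero, show (decide ((0 : Nat) % 2 = 0)) = true from rfl]
  rw [hflat, fmt_flat]
  congr 1
  simp only [List.nil_append]
  exact congrArg List.flatten (List.map_congr_left (fun d hd => pair_eq_triple d (hlt d hd)))
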